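-- pv_equiv track=rewrite | github.com/dtc03003/Algo | 프로그래머스/2/70129. 이진 변환 반복하기/이진 변환 반복하기.py | solution
-- ===== SOURCE A (Python) =====
-- def solution(s):
--     count = 0
--     num = 0
--     while(1):
--         if(s == "1"):
--             return [num, count]
--         num += 1
--         count += s.count("0")
--         s = s.replace("0", "")
--         s = format(len(s), 'b')
-- ===== SOURCE B (Python) =====
-- def solution(s):
--     if s == "1":
--         return [0, 0]
--
--     # recursively build the whole trajectory of surviving-ones counts first
--     def chain(n):
--         if n == 1:
--             return [1]
--         return [n] + chain(bin(n).count("1"))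
--
--     survivors = sum(c != "0" for c in s)   # chars kept by replace('0','')
--     vals = chain(survivors)
--     zeros = (len(s) - survivors) + sum(v.bit_length() - bin(v).count("1")
--                                        for v in vals[:-1])
--     return [len(vals), zeros]
-- ===== Notes on version B (the rewrite author's own statement) =====
-- stated objective: alternative
-- what changed: B is staged instead of a single accumulator loop: it first recursively materialises the whole trajectory of surviving-character counts as a list (integers with popcount, no string rebuilding), then derives the step count as the list length and the removed zeros as one sum over the list; Pre_ excludes only the strings with no non-'0' character, on which A never returns (infinite loop) and B's recursion does not terminate either.
-- outside the precondition, e.g. on solution('0'): A does not finish within the time limit, B raises RecursionError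
import Mathlib
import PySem

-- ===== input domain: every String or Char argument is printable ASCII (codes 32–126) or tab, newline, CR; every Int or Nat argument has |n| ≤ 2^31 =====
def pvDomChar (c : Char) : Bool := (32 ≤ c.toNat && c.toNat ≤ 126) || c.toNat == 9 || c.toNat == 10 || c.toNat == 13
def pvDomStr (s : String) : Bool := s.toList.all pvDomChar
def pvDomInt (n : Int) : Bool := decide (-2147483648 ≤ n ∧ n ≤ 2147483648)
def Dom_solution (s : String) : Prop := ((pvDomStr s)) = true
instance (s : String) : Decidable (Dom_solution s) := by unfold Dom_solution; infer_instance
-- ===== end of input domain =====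

-- B stages the computation: it first recursively builds the whole trajectory of
-- surviving-character counts as a list of integers (popcount, no string rebuilding),
-- then reads the step count off its length and the removed zeros off one sum
-- (objective: alternative; same overall cost, both dominated by the initial scan).

-- ===== PORT A =====
-- format(n, 'b') for n : Nat — binary digits, most significant first (exact hand port: no PySem primitive)
def binDigits (n : Nat) : List Char :=
  if h : n = 0 then []
  else binDigits (n / 2) ++ [if n % 2 = 1 then '1' else '0']
decreasing_by exact Nat.div_lt_self (Nat.pos_of_ne_zero h) one_lt_two

def pyFormatB (n : Nat) : List Char := if n = 0 then ['0'] else binDigits n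

-- the while(1) loop of A, on the string as List Char; fuel only makes the (possibly
-- infinite) loop total — it is never exhausted on inputs satisfying Pre_solution.
-- s.count("0") for a 1-char needle is exactly List.count '0'; s.replace("0","") is
-- exactly List.filter (· ≠ '0') (each occurrence of the single char is deleted).
def solutionLoop : Nat → List Char → Int → Int → List Int
  | 0, _, _, _ => []
  | fuel + 1, s, num, count =>
    if s = ['1'] then [num, count]
    else
      let num := num + 1
      let count := count + (s.count '0' : Int)
      let s := s.filter (· ≠ '0')
      let s := pyFormatB s.length
      solutionLoop fuel s num count

def solution (s : String) : List Int :=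
  solutionLoop (s.toList.length + 2) s.toList 0 0

-- ===== PORT B =====
-- B's recursive chain(n): the trajectory n, popcount n, … down to 1; fuel n+1 only
-- makes the recursion total (bitCount n < n for n ≥ 2) — it is never exhausted on
-- inputs satisfying Pre_solution. bin(n).count("1") = PySem.Int.bitCount,
-- n.bit_length() = PySem.Int.bitLength.
def chainL : Nat → Nat → List Nat
  | 0, _ => []
  | fuel + 1, n =>
    if n = 1 then [1] else n :: chainL fuel (PySem.Int.bitCount (n : Int))

def solution_alt (s : String) : List Int :=
  if s.toList = ['1'] then [0, 0]
  else
    let survivors := (s.toList.filter (· ≠ '0')).length  -- sum(c != "0" for c in s)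
    let vals := chainL (survivors + 1) survivors
    let zeros : Int := ((s.toList.length : Int) - (survivors : Int)) +
      (vals.dropLast.map (fun (v : Nat) =>
        ((PySem.Int.bitLength (v : Int) : Int) - (PySem.Int.bitCount (v : Int) : Int)))).sum
    [(vals.length : Int), zeros]

-- ===== PRECONDITION & SPEC =====
-- A loops forever (never returns) when s has no character other than '0'
-- (s = "", "0", "00", …) — and B's recursion does not terminate there either:
-- Pre_ admits exactly the strings with some non-'0' character, i.e. every input
-- on which A returns.
def Pre_solution (s : String) : Prop := s.toList.any (· != '0') = true
instance (s : String) : Decidable (Pre_solution s) := by unfold Pre_solution; infer_instance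
def pvWitness_solution : String := ("10")

def Spec_solution (s : String) (out : List Int) : Prop := out = solution_alt s
instance (s : String) (out : List Int) : Decidable (Spec_solution s out) := by unfold Spec_solution; infer_instance

-- ===== CLAIM (what is proved, stated in full; the proofs are below) =====
def Claim_equal_solution : Prop := ∀ (s : String), Dom_solution s → Pre_solution s → Spec_solution s (solution s)


-- ===== LEMMAS AND PROOFS =====

lemma solutionLoop_succ (fuel : Nat) (s : List Char) (num count : Int) :
    solutionLoop (fuel + 1) s num count =
      if s = ['1'] then [num, count]
      else solutionLoop fuel (pyFormatB ((s.filter (· ≠ '0')).length)) (num + 1)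
        (count + (s.count '0' : Int)) := rfl

lemma chainL_succ (fuel n : Nat) :
    chainL (fuel + 1) n =
      if n = 1 then [1] else n :: chainL fuel (PySem.Int.bitCount (n : Int)) := rfl

lemma binDigits_zero : binDigits 0 = [] := by rw [binDigits]; rfl

lemma binDigits_one : binDigits 1 = ['1'] := by rw [binDigits, binDigits_zero]; rfl

lemma pyFormatB_one : pyFormatB 1 = ['1'] := by simp [pyFormatB, binDigits_one]

lemma bitCount_le_self (n : Nat) : PySem.Int.bitCount (n : Int) ≤ n := by
  induction n using Nat.strong_induction_on with
  | _ n ih =>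
    rcases Nat.eq_zero_or_pos n with h | h
    · subst h; simp
    · rw [PySem.Int.bitCount_natCast h]
      have := ih (n / 2) (Nat.div_lt_self h one_lt_two)
      omega

lemma bitCount_pos (n : Nat) (h : 1 ≤ n) : 1 ≤ PySem.Int.bitCount (n : Int) := by
  induction n using Nat.strong_induction_on with
  | _ n ih =>
    rw [PySem.Int.bitCount_natCast h]
    rcases Nat.lt_or_ge n 2 with h2 | h2
    · interval_cases n
      simp
    · have := ih (n / 2) (Nat.div_lt_self (by omega) one_lt_two) (by omega)
      omega

lemma bitCount_lt_self (n : Nat) (h : 2 ≤ n) : PySem.Int.bitCount (n : Int) < n := by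
  rw [PySem.Int.bitCount_natCast (by omega)]
  have := bitCount_le_self (n / 2)
  omega

lemma bitLength_pos (n : Nat) (h : 1 ≤ n) : 1 ≤ PySem.Int.bitLength (n : Int) := by
  rw [PySem.Int.bitLength_natCast h]; omega

lemma length_binDigits (n : Nat) : (binDigits n).length = PySem.Int.bitLength (n : Int) := by
  induction n using Nat.strong_induction_on with
  | _ n ih =>
    rcases Nat.eq_zero_or_pos n with h | h
    · subst h; rw [binDigits_zero]; simp
    · rw [binDigits, dif_neg (Nat.pos_iff_ne_zero.mp h), PySem.Int.bitLength_natCast h]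
      have hIH := ih (n / 2) (Nat.div_lt_self h one_lt_two)
      set B := PySem.Int.bitLength ((n / 2 : Nat) : Int) with hB
      simp only [List.length_append, List.length_singleton]
      omega

lemma count0_binDigits (n : Nat) :
    (binDigits n).count '0' + PySem.Int.bitCount (n : Int) = PySem.Int.bitLength (n : Int) := by
  induction n using Nat.strong_induction_on with
  | _ n ih =>
    rcases Nat.eq_zero_or_pos n with h | h
    · subst h; rw [binDigits_zero]; simp
    · rw [binDigits, dif_neg (Nat.pos_iff_ne_zero.mp h),
        PySem.Int.bitCount_natCast h, PySem.Int.bitLength_natCast h]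
      have hIH := ih (n / 2) (Nat.div_lt_self h one_lt_two)
      set B := PySem.Int.bitCount ((n / 2 : Nat) : Int) with hB
      set L := PySem.Int.bitLength ((n / 2 : Nat) : Int) with hL
      rcases Nat.mod_two_eq_zero_or_one n with hm | hm <;>
        rw [hm] <;> simp [List.count_append] <;> omega

lemma filter_binDigits (n : Nat) :
    ((binDigits n).filter (· ≠ '0')).length = PySem.Int.bitCount (n : Int) := by
  induction n using Nat.strong_induction_on with
  | _ n ih =>
    rcases Nat.eq_zero_or_pos n with h | h
    · subst h; rw [binDigits_zero]; simp
    · rw [binDigits, dif_neg (Nat.pos_iff_ne_zero.mp h), PySem.Int.bitCount_natCast h]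
      have hIH := ih (n / 2) (Nat.div_lt_self h one_lt_two)
      set B := PySem.Int.bitCount ((n / 2 : Nat) : Int) with hB
      rcases Nat.mod_two_eq_zero_or_one n with hm | hm <;>
        rw [hm] <;> simp [List.filter_append] at hIH ⊢ <;> omega

lemma binDigits_ne_one (n : Nat) (h : 2 ≤ n) : binDigits n ≠ ['1'] := by
  intro he
  have hl := length_binDigits n
  rw [he, PySem.Int.bitLength_natCast (by omega : 0 < n)] at hl
  have h2 := bitLength_pos (n / 2) (by omega)
  simp only [List.length_singleton] at hl
  omega

-- A's loop starting from format(n,'b') equals: num gains (chain n).length - 1 more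
-- steps, count gains the sum of (bit_length - popcount) over all but the last
-- chain entry (exactly B's staged reading of the remaining rounds).
lemma loopsEq (n : Nat) : ∀ (f1 f2 : Nat) (num count : Int), 1 ≤ n → n < f1 → n < f2 →
    solutionLoop f1 (pyFormatB n) num count =
      [num - 1 + ((chainL f2 n).length : Int),
       count + (((chainL f2 n).dropLast.map (fun (v : Nat) =>
         ((PySem.Int.bitLength (v : Int) : Int) - (PySem.Int.bitCount (v : Int) : Int)))).sum)] := by
  induction n using Nat.strong_induction_on with
  | _ n ih =>
    intro f1 f2 num count h1 hf1 hf2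
    obtain ⟨f1', rfl⟩ : ∃ k, f1 = k + 1 := ⟨f1 - 1, by omega⟩
    obtain ⟨f2', rfl⟩ : ∃ k, f2 = k + 1 := ⟨f2 - 1, by omega⟩
    rw [solutionLoop_succ, chainL_succ]
    rcases eq_or_lt_of_le h1 with h | h
    · -- n = 1 : A returns [num, count], chain = [1]
      rw [← h, pyFormatB_one]
      simp
    · -- n ≥ 2
      have hpf : pyFormatB n = binDigits n := by unfold pyFormatB; rw [if_neg (by omega)]
      have hne : binDigits n ≠ ['1'] := binDigits_ne_one n (by omega)
      have hbc1 : 1 ≤ PySem.Int.bitCount (n : Int) := bitCount_pos n h1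
      have hbclt : PySem.Int.bitCount (n : Int) < n := bitCount_lt_self n (by omega)
      rw [hpf, if_neg hne, if_neg (by omega : ¬ n = 1), filter_binDigits n,
        ih (PySem.Int.bitCount (n : Int)) hbclt f1' f2' _ _ hbc1 (by omega) (by omega)]
      have hchain_ne : chainL f2' (PySem.Int.bitCount (n : Int)) ≠ [] := by
        obtain ⟨k, hk⟩ : ∃ k, f2' = k + 1 := ⟨f2' - 1, by omega⟩
        subst hk
        rw [chainL_succ]
        split <;> simp
      rw [List.dropLast_cons_of_ne_nil hchain_ne]
      have hc := count0_binDigits n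
      simp only [List.cons.injEq, and_true, List.length_cons, List.map_cons, List.sum_cons]
      refine ⟨by push_cast; ring, ?_⟩
      omega

lemma length_filter_count (L : List Char) :
    (L.filter (· ≠ '0')).length = L.length - L.count '0' := by
  induction L with
  | nil => rfl
  | cons c cs ih =>
    have hcle : cs.count '0' ≤ cs.length := List.count_le_length
    by_cases hc : c = '0' <;>
      simp [hc] at ih ⊢ <;> omega

-- ===== VERDICT (by name: the statement is the Claim_ definition above) =====
theorem solution_spec : Claim_equal_solution := by
  intro s _ hpre
  unfold Spec_solution solution solution_alt
  by_cases h1 : s.toList = ['1']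
  · rw [if_pos h1, h1]
    rfl
  · rw [if_neg h1,
      show s.toList.length + 2 = (s.toList.length + 1) + 1 from rfl,
      solutionLoop_succ, if_neg h1]
    obtain ⟨c, hc, hc0'⟩ := List.any_eq_true.mp hpre
    have hc0 : c ≠ '0' := by simpa using hc0'
    have hm : 1 ≤ ((s.toList.filter (· ≠ '0')).length) := by
      have : c ∈ s.toList.filter (· ≠ '0') := List.mem_filter.mpr ⟨hc, by simpa using hc0⟩
      exact List.length_pos_of_mem this
    have hle : (s.toList.filter (· ≠ '0')).length ≤ s.toList.length := List.length_filter_le _ _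
    have heq := length_filter_count s.toList
    have hcnt : s.toList.count '0' ≤ s.toList.length := List.count_le_length
    rw [loopsEq ((s.toList.filter (· ≠ '0')).length) (s.toList.length + 1)
      ((s.toList.filter (· ≠ '0')).length + 1) (0 + 1) (0 + (s.toList.count '0' : Int))
      hm (by omega) (by omega)]
    simp only [List.cons.injEq, and_true]
    constructor
    · ring
    · rw [heq]; push_cast [hcnt]; ring
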